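-- pv_equiv track=rewrite | github.com/Gmt-santos/Calculadora | calculadora/calculadora/calculadora_projeto.py | empacotar_lista_numeros_entre_sinais
-- ===== SOURCE A (Python) =====
-- def empacotar_lista_numeros_entre_sinais(texto):
--     lista=[]
--     permissao=False
--     for n in texto:
--         if n in "+-/x÷":
--            permissao=True
--         if n in "=":
--             permissao=False
--         if permissao == True and n not in "+-/x÷":
--             lista.append(n)
--
--     return lista
-- ===== SOURCE B (Python) =====
-- def empacotar_lista_numeros_entre_sinais(texto):
--     ops = "+-/x÷"
--     lista = []
--     for seg in texto.split("="):
--         k = next((i for i, c in enumerate(seg) if c in ops), len(seg))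
--         lista.extend(c for c in seg[k:] if c not in ops)
--     return lista
-- ===== Notes on version B (the rewrite author's own statement) =====
-- stated objective: alternative
-- what changed: Replaces A's single flag-carrying loop over characters with a decomposition that splits the text at the equals sign, locates the first operator of each segment, and filters the segment tail (no boolean state carried between characters).
import Mathlib
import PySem

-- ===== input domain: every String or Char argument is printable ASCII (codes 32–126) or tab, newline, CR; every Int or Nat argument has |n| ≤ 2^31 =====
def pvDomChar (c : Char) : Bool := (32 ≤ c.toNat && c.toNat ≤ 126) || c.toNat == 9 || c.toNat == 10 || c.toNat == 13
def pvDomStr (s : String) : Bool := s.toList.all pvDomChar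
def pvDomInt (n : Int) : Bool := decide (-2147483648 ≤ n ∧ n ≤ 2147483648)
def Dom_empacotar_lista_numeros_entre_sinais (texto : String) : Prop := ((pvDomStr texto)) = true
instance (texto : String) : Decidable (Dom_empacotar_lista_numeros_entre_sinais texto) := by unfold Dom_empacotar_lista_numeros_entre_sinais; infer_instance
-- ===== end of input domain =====

-- B replaces A's flag-carrying character loop by a split-on-'=' / find-first-operator / filter decomposition (alternative, same cost).


-- the operator characters "+-/x÷" (a literal appearing in both Python sources)
def pvOps : List Char := "+-/x÷".toList

-- ===== PORT A =====
-- one iteration of A's for-loop: permissao is updated by the two sign tests, then n is appended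
-- exactly when the updated permissao holds and n is not an operator
def pvStepA (st : List String × Bool) (n : Char) : List String × Bool :=
  let p := if n = '=' then false else (if pvOps.contains n then true else st.2)
  (if p && !pvOps.contains n then st.1 ++ [String.ofList [n]] else st.1, p)

def empacotar_lista_numeros_entre_sinais (texto : String) : List String :=
  (texto.toList.foldl pvStepA (([] : List String), false)).1

-- ===== PORT B =====
-- per segment: k = index of first operator (length if none), then the non-operator chars of seg[k:]
def pvSegPack (seg : List Char) : List String :=
  let k := seg.findIdx (fun c => pvOps.contains c)
  ((seg.drop k).filter (fun c => !pvOps.contains c)).map (fun c => String.ofList [c])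

def empacotar_lista_numeros_entre_sinais_alt (texto : String) : List String :=
  ((texto.toList.splitOn '=').map pvSegPack).flatten

-- ===== PRECONDITION & SPEC =====
def Spec_empacotar_lista_numeros_entre_sinais (texto : String) (out : List String) : Prop := out = empacotar_lista_numeros_entre_sinais_alt texto
instance (texto : String) (out : List String) : Decidable (Spec_empacotar_lista_numeros_entre_sinais texto out) := by unfold Spec_empacotar_lista_numeros_entre_sinais; infer_instance

-- ===== CLAIM (what is proved, stated in full; the proofs are below) =====
def Claim_equal_empacotar_lista_numeros_entre_sinais : Prop := ∀ (texto : String), Dom_empacotar_lista_numeros_entre_sinais texto → Spec_empacotar_lista_numeros_entre_sinais texto (empacotar_lista_numeros_entre_sinais texto)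

-- ===== LEMMAS AND PROOFS =====

-- B's value computed from an explicit flag, for the loop invariant:
-- with the flag already up, the head segment is filtered whole; with the flag down it goes through pvSegPack
def pvPackFrom (p : Bool) (l : List Char) : List String :=
  match List.splitOnP (fun c => c == '=') l with
  | [] => []
  | s :: rest =>
      (if p then (s.filter (fun c => !pvOps.contains c)).map (fun c => String.ofList [c])
       else pvSegPack s) ++ (rest.map pvSegPack).flatten

theorem pvStepA_acc (acc : List String) (p : Bool) (c : Char) :
    pvStepA (acc, p) c = (acc ++ (pvStepA ([], p) c).1, (pvStepA ([], p) c).2) := by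
  unfold pvStepA
  split <;> simp
  cases p <;> by_cases h2 : c ∈ pvOps <;> simp_all

theorem pvFoldA_acc (l : List Char) : ∀ (acc : List String) (p : Bool),
    List.foldl pvStepA (acc, p) l
      = (acc ++ (List.foldl pvStepA ([], p) l).1, (List.foldl pvStepA ([], p) l).2) := by
  induction l with
  | nil => intro acc p; simp
  | cons c l ih =>
      intro acc p
      rw [List.foldl_cons, List.foldl_cons, pvStepA_acc, ih]
      have h2 := ih (pvStepA ([], p) c).1 (pvStepA ([], p) c).2
      rw [Prod.mk.eta] at h2
      rw [h2]
      simp [List.append_assoc]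

theorem pvLoop_eq_packFrom (l : List Char) : ∀ (p : Bool),
    (List.foldl pvStepA (([] : List String), p) l).1 = pvPackFrom p l := by
  induction l with
  | nil =>
      intro p
      simp only [List.foldl_nil, pvPackFrom, List.splitOnP_nil]
      cases p <;> simp [pvSegPack]
  | cons c l ih =>
      intro p
      obtain ⟨s, rest, hsp⟩ : ∃ s rest, List.splitOnP (fun c => c == '=') l = s :: rest := by
        cases h : List.splitOnP (fun c => c == '=') l with
        | nil => exact absurd h (List.splitOnP_ne_nil _ l)
        | cons s rest => exact ⟨s, rest, rfl⟩
      by_cases he : c = '='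
      · -- '=' resets the flag and is never appended
        subst he
        have hstep : pvStepA ([], p) '=' = ([], false) := by simp [pvStepA]
        rw [List.foldl_cons, hstep, ih false]
        simp only [pvPackFrom, List.splitOnP_cons, beq_self_eq_true, hsp]
        cases p <;> simp [pvSegPack]
      · have hsp' : List.splitOnP (fun c => c == '=') (c :: l) = (c :: s) :: rest := by
          rw [List.splitOnP_cons]; simp [he, hsp, List.modifyHead]
        by_cases hop : pvOps.contains c = true
        · -- c is an operator: the flag goes up, c itself is not appended
          have hc : c ∈ pvOps := by simpa using hop
          have hstep : pvStepA ([], p) c = ([], true) := by simp [pvStepA, he, hc]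
          rw [List.foldl_cons, hstep, ih true]
          simp only [pvPackFrom, hsp, hsp']
          cases p <;> simp [pvSegPack, List.findIdx_cons, hc]
        · -- c is neither an operator nor '=': the flag is unchanged, c appended iff the flag is up
          have hc : c ∉ pvOps := by simpa using hop
          cases p with
          | false =>
              have hstep : pvStepA ([], false) c = ([], false) := by
                simp [pvStepA, he, hc]
              rw [List.foldl_cons, hstep, ih false]
              simp [pvPackFrom, hsp, hsp', pvSegPack, List.findIdx_cons, hc]
          | true =>
              have hstep : pvStepA ([], true) c = ([String.ofList [c]], true) := by
                simp [pvStepA, he, hc]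
              rw [List.foldl_cons, hstep, pvFoldA_acc, ih true]
              simp [pvPackFrom, hsp, hsp', hc]

-- ===== VERDICT (by name: the statement is the Claim_ definition above) =====
theorem empacotar_lista_numeros_entre_sinais_spec : Claim_equal_empacotar_lista_numeros_entre_sinais := by
  intro texto _
  unfold Spec_empacotar_lista_numeros_entre_sinais
  unfold empacotar_lista_numeros_entre_sinais empacotar_lista_numeros_entre_sinais_alt
  rw [pvLoop_eq_packFrom]
  unfold pvPackFrom
  rw [List.splitOn]
  cases h : List.splitOnP (fun c => c == '=') texto.toList with
  | nil => exact absurd h (List.splitOnP_ne_nil _ texto.toList)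
  | cons s rest => simp
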